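-- pv_equiv track=rewrite | github.com/seckinaslan/Sahibinden | code/PredictPrice.py | name_to_num
-- ===== SOURCE A (Python) =====
-- def name_to_num(list1):
--     n = 1
--     d = dict()
--     for q in list1:
--         if q not in d:
--             d[q] = n
--             n += 1
--     return d
-- ===== SOURCE B (Python) =====
-- def name_to_num(list1):
--     first = {q: i for i, q in reversed(list(enumerate(list1)))}
--     order = sorted(first, key=first.get)
--     return dict(zip(order, range(1, len(order) + 1)))
-- ===== Notes on version B (the rewrite author's own statement) =====
-- stated objective: alternative
-- what changed: Instead of A's single membership-guarded pass with an explicit counter, B builds a first-occurrence-index map by overwriting inserts over the reversed enumeration (no membership test), sorts the keys by that index, and zips them with range(1, len+1).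
import Mathlib
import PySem

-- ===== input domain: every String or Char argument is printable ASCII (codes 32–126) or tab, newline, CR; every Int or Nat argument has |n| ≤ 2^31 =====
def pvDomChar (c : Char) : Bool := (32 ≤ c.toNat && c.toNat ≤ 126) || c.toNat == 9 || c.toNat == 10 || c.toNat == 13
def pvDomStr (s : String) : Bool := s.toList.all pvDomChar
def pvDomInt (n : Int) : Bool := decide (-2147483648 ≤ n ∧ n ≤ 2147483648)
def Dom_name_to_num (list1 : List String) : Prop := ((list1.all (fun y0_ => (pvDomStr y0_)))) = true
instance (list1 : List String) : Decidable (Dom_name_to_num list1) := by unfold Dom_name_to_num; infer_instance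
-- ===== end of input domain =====

-- B builds a first-occurrence-index map by overwriting inserts over the REVERSED enumeration,
-- sorts the keys by that index and zips with range(1, len+1); A is a single membership-guarded
-- pass with a counter (objective: alternative).


-- ===== PORT A =====
-- state: (d, n); 'if q not in d: d[q] = n; n += 1'
def name_to_num (list1 : List String) : List (String × Int) :=
  (list1.foldl
    (fun (st : PySem.Dict String Int × Int) q =>
      if st.1.contains q then st else (st.1.insert q st.2, st.2 + 1))
    (PySem.Dict.empty, 1)).1.items

-- ===== PORT B =====
-- first = {q: i for i, q in reversed(list(enumerate(list1)))}; order = sorted(first, key=first.get);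
-- return dict(zip(order, range(1, len(order)+1))).  first.get(q) is always a value here (q is a key),
-- so the lookup is ported as getD; dict(zip(...)) on the distinct keys is the zipped pair list in order.
def name_to_num_alt (list1 : List String) : List (String × Int) :=
  let first : PySem.Dict String Int :=
    ((PySem.List.enumerate list1 0).reverse).foldl (fun d p => d.insert p.2 p.1) PySem.Dict.empty
  let order := PySem.List.sorted first.keys (fun q => first.getD q 0)
  order.zip (PySem.List.pyRange 1 (1 + (order.length : Int)))

-- ===== PRECONDITION & SPEC =====
def Spec_name_to_num (list1 : List String) (out : List (String × Int)) : Prop := out = name_to_num_alt list1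
instance (list1 : List String) (out : List (String × Int)) : Decidable (Spec_name_to_num list1 out) := by unfold Spec_name_to_num; infer_instance

-- ===== CLAIM (what is proved, stated in full; the proofs are below) =====
def Claim_equal_name_to_num : Prop := ∀ (list1 : List String), Dom_name_to_num list1 → Spec_name_to_num list1 (name_to_num list1)

-- ===== LEMMAS AND PROOFS =====

-- the first occurrences of l not already in ks, in order
def freshDedup (l ks : List String) : List String :=
  match l with
  | [] => []
  | q :: l => if q ∈ ks then freshDedup l ks else q :: freshDedup l (ks ++ [q])

theorem foldl_add_prefix (l : List String) (s : List String) :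
    ∃ t, l.foldl PySem.Set.add s = s ++ t := by
  induction l generalizing s with
  | nil => exact ⟨[], by simp⟩
  | cons q l ih =>
    simp only [List.foldl_cons, PySem.Set.add]
    by_cases h : PySem.Set.contains s q = true
    · simp only [if_pos h]; exact ih s
    · simp only [if_neg h]
      obtain ⟨t, ht⟩ := ih (s ++ [q])
      exact ⟨q :: t, by simpa using ht⟩

theorem freshDedup_eq_drop (l ks : List String) :
    freshDedup l ks = (l.foldl PySem.Set.add ks).drop ks.length := by
  induction l generalizing ks with
  | nil => simp [freshDedup]
  | cons q l ih =>
    simp only [freshDedup, List.foldl_cons, PySem.Set.add]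
    by_cases h : q ∈ ks
    · rw [if_pos h, if_pos ((PySem.Set.contains_iff ks q).mpr h), ih ks]
    · rw [if_neg h, if_neg (fun hc => h ((PySem.Set.contains_iff ks q).mp hc)), ih (ks ++ [q])]
      obtain ⟨t, ht⟩ := foldl_add_prefix l (ks ++ [q])
      rw [ht, List.drop_left, List.append_assoc, List.drop_left]
      rfl

theorem freshDedup_nil_right (l : List String) :
    freshDedup l [] = PySem.List.dedup l := by
  rw [freshDedup_eq_drop, PySem.List.dedup_eq_ofList, PySem.Set.ofList_eq_foldl]
  simp

theorem loop_items (l : List String) (d : PySem.Dict String Int) (n : Int)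
    (hnd : d.keys.Nodup) :
    (l.foldl
      (fun (st : PySem.Dict String Int × Int) q =>
        if st.1.contains q then st else (st.1.insert q st.2, st.2 + 1))
      (d, n)).1.items
    = d.items ++ (PySem.List.enumerate (freshDedup l d.keys) n).map (fun p => (p.2, p.1)) := by
  induction l generalizing d n with
  | nil => simp [freshDedup]
  | cons q l ih =>
    simp only [List.foldl_cons, freshDedup]
    by_cases h : d.contains q
    · have hm : q ∈ d.keys := (PySem.Dict.contains_iff_mem_keys d q).mp h
      simp [h, hm, ih d n hnd]
    · have hm : q ∉ d.keys := fun hq => h ((PySem.Dict.contains_iff_mem_keys d q).mpr hq)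
      have hc : d.contains q = false := by simpa using h
      have hkeys : (d.insert q n).keys = d.keys ++ [q] :=
        PySem.Dict.keys_insert_of_not_contains d n hc
      have hnd' : (d.insert q n).keys.Nodup := by
        rw [hkeys, List.nodup_append]
        exact ⟨hnd, List.nodup_singleton q, fun a ha b hb => by
          rw [List.mem_singleton.mp hb]; exact fun he => hm (he ▸ ha)⟩
      rw [if_neg h, if_neg hm, ih (d.insert q n) (n + 1) hnd',
        PySem.Dict.items_insert_of_not_contains d n hc, hkeys,
        PySem.List.enumerate_cons]
      simp

-- A's items are the first-occurrence dedup numbered from 1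
theorem name_to_num_eq_enumerate (l : List String) :
    name_to_num l = (PySem.List.enumerate (PySem.List.dedup l) 1).map (fun p => (p.2, p.1)) := by
  rw [name_to_num, loop_items l PySem.Dict.empty 1 (by simp [PySem.Dict.keys_empty]),
    ← freshDedup_nil_right]
  simp [PySem.Dict.keys_empty]
  rfl

-- the dict built by B's reversed-enumeration comprehension, as a named helper for the lemmas
def firstDict (l : List String) : PySem.Dict String Int :=
  ((PySem.List.enumerate l 0).reverse).foldl (fun d p => d.insert p.2 p.1) PySem.Dict.empty

-- overwriting inserts over ps: the stored value for q is the LAST pair with key q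
theorem getD_foldl_insert_rev (ps : List (Int × String)) (d : PySem.Dict String Int) (q : String) :
    (ps.foldl (fun d p => d.insert p.2 p.1) d).getD q 0 =
      match ps.reverse.find? (fun p => p.2 == q) with
      | some p => p.1
      | none => d.getD q 0 := by
  induction ps generalizing d with
  | nil => simp
  | cons p ps ih =>
    simp only [List.foldl_cons, List.reverse_cons, ih, List.find?_append]
    cases hf : ps.reverse.find? (fun p => p.2 == q) with
    | some r => simp
    | none =>
      by_cases hq : q = p.2
      · subst hq; simp [PySem.Dict.getD_insert_self]
      · rw [List.find?_cons_of_neg (by simpa using fun he : p.2 = q => hq he.symm)]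
        simp [PySem.Dict.getD_insert_of_ne d _ _ hq]

-- the first pair of enumerate(l, s) carrying a member q is (s + idxOf q, q)
theorem find?_enumerate_of_mem (l : List String) (q : String) (s : Int) (h : q ∈ l) :
    (PySem.List.enumerate l s).find? (fun p => p.2 == q) = some (s + (l.idxOf q : Int), q) := by
  induction l generalizing s with
  | nil => cases h
  | cons x t ih =>
    rw [PySem.List.enumerate_cons]
    by_cases hx : x = q
    · subst hx; simp [List.find?, List.idxOf_cons_self]
    · have ht : q ∈ t := by cases List.mem_cons.mp h with
        | inl he => exact absurd he.symm hx
        | inr ht => exact ht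
      rw [List.find?_cons_of_neg (by simpa using hx), ih (s + 1) ht,
        List.idxOf_cons_ne _ hx]
      congr 2
      push_cast
      ring

-- the stored index of a member is its first-occurrence index
theorem getD_firstDict_of_mem (l : List String) (q : String) (h : q ∈ l) :
    (firstDict l).getD q 0 = (l.idxOf q : Int) := by
  rw [firstDict, getD_foldl_insert_rev, List.reverse_reverse, find?_enumerate_of_mem l q 0 h]
  simp

-- the keys of the dict are set(reversed(l)): every element of l, each once
theorem keys_firstDict (l : List String) :
    (firstDict l).keys = PySem.Set.ofList l.reverse := by
  rw [firstDict,
    PySem.Dict.keys_foldl_insert_key ((PySem.List.enumerate l 0).reverse) Prod.snd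
      (fun _ p => p.1) PySem.Dict.empty,
    PySem.Dict.keys_empty]
  have : ((PySem.List.enumerate l 0).reverse).map Prod.snd = l.reverse := by
    rw [List.map_reverse]
    exact congrArg List.reverse (PySem.List.map_snd_enumerate l 0)
  rw [this, PySem.Set.ofList_eq_foldl]
  rfl

-- first-occurrence indices strictly increase along set(l)
theorem pairwise_idxOf_ofList (l : List String) :
    (PySem.Set.ofList l).Pairwise (fun a b => l.idxOf a < l.idxOf b) := by
  induction l with
  | nil => simp [PySem.Set.ofList]
  | cons x t ih =>
    rw [PySem.Set.ofList_cons]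
    constructor
    · intro b hb
      obtain ⟨-, hbx⟩ := (PySem.Set.mem_discard (PySem.Set.ofList t) x b).mp hb
      simp [List.idxOf_cons_self, List.idxOf_cons_ne _ (fun he => hbx he.symm)]
    · have hsub : ((PySem.Set.ofList t).discard x).Sublist (PySem.Set.ofList t) := by
        simp only [PySem.Set.discard]; exact List.filter_sublist
      refine (ih.sublist hsub).imp_of_mem ?_
      intro a b ha hb hab
      obtain ⟨-, hax⟩ := (PySem.Set.mem_discard (PySem.Set.ofList t) x a).mp ha
      obtain ⟨-, hbx⟩ := (PySem.Set.mem_discard (PySem.Set.ofList t) x b).mp hb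
      rw [List.idxOf_cons_ne _ (fun he => hax he.symm), List.idxOf_cons_ne _ (fun he => hbx he.symm)]
      omega

-- B's sorted(first, key=first.get) is exactly the first-occurrence dedup
theorem sorted_keys_eq_dedup (l : List String) :
    PySem.List.sorted (firstDict l).keys (fun q => (firstDict l).getD q 0)
      = PySem.List.dedup l := by
  rw [PySem.List.dedup_eq_ofList]
  refine PySem.List.sorted_eq_of_perm_of_pairwise_lt _ _ _ ?_ ?_
  · rw [keys_firstDict]
    refine (List.perm_ext_iff_of_nodup (PySem.Set.nodup_ofList l)
      (PySem.Set.nodup_ofList l.reverse)).mpr ?_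
    intro a
    rw [PySem.Set.mem_ofList, PySem.Set.mem_ofList, List.mem_reverse]
  · refine (pairwise_idxOf_ofList l).imp_of_mem ?_
    intro a b ha hb hab
    rw [getD_firstDict_of_mem l a ((PySem.Set.mem_ofList l a).mp ha),
      getD_firstDict_of_mem l b ((PySem.Set.mem_ofList l b).mp hb)]
    exact_mod_cast hab

-- name_to_num_alt with its lets named (definitional)
theorem name_to_num_alt_eq (l : List String) :
    name_to_num_alt l
      = (PySem.List.sorted (firstDict l).keys (fun q => (firstDict l).getD q 0)).zip
          (PySem.List.pyRange 1
            (1 + ((PySem.List.sorted (firstDict l).keys (fun q => (firstDict l).getD q 0)).length : Int))) := rfl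

-- zipping with range(s, s+len) is enumerate with the pair swapped
theorem zip_pyRange_eq_enumerate (xs : List String) (s : Int) :
    xs.zip (PySem.List.pyRange s (s + (xs.length : Int)))
      = (PySem.List.enumerate xs s).map (fun p => (p.2, p.1)) := by
  induction xs generalizing s with
  | nil => simp [PySem.List.pyRange_one_eq_nil]
  | cons x t ih =>
    rw [PySem.List.enumerate_cons, PySem.List.pyRange_one_cons (by
      simp only [List.length_cons]; push_cast; omega)]
    simp only [List.zip_cons_cons, List.map_cons]
    have : s + ((x :: t).length : Int) = (s + 1) + (t.length : Int) := by
      simp only [List.length_cons]; push_cast; omega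
    rw [this, ih (s + 1)]

-- ===== VERDICT (by name: the statement is the Claim_ definition above) =====
theorem name_to_num_spec : Claim_equal_name_to_num := by
  intro list1 _
  show name_to_num list1 = name_to_num_alt list1
  rw [name_to_num_eq_enumerate, name_to_num_alt_eq]
  simp only [sorted_keys_eq_dedup]
  rw [zip_pyRange_eq_enumerate]
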